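-- pv_equiv track=rewrite | github.com/vladis62/only-algo |  yandex/sprint_4/polinom_hash.py | calc_prefix_hash
-- ===== SOURCE A (Python) =====
-- def calc_prefix_hash(s, a, mod):
--     l = len(s)
--     result = 0
--     for i in range(0, l):
--         if i != l - 1:
--             result = (result + ord(s[i])) * a
--         else:
--             result += ord(s[i])
--         result %= mod
--     return result % mod
-- ===== SOURCE B (Python) =====
-- def calc_prefix_hash(s, a, mod):
--     l = len(s)
--     total = 0
--     for i in range(l):
--         total += ord(s[i]) * pow(a, l - 1 - i, mod)
--     return total % mod
-- ===== Notes on version B (the rewrite author's own statement) =====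
-- stated objective: alternative
-- what changed: Replaces Horner's fused multiply-accumulate loop with direct closed-form evaluation: each term ord(s[i])*pow(a, l-1-i, mod) is computed independently via builtin modular exponentiation and the terms are summed, with a single final reduction.
import Mathlib
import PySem

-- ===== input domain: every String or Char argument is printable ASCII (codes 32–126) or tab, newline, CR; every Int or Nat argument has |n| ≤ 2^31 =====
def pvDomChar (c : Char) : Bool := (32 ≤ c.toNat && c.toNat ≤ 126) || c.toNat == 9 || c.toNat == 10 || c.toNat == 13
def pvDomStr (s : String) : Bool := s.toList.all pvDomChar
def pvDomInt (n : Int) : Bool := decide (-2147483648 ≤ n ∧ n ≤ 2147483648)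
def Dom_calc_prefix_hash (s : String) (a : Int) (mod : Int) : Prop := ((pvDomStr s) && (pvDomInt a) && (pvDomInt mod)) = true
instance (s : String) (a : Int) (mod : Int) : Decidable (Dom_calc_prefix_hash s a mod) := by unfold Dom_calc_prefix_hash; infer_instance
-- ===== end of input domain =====

-- B replaces A's Horner accumulator loop with direct closed-form evaluation: each term
-- ord(s[i])·pow(a, l-1-i, mod) is computed independently by modular exponentiation and the
-- terms are summed, with one final reduction. Alternative decomposition, not faster.

-- ===== PORT A =====
-- loop `for i in range(l)` with the `i != l-1` branch: structural recursion where
-- `rest ≠ []` is exactly `i ≠ l-1`; `result %= mod` closes every iteration.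
def calcPrefixHashGoA (a m : Int) : Int → List Char → Int
  | r, [] => r
  | r, c :: rest =>
    calcPrefixHashGoA a m
      (PySem.Int.mod (if rest ≠ [] then (r + (c.toNat : Int)) * a else r + (c.toNat : Int)) m)
      rest

def calc_prefix_hash (s : String) (a : Int) (mod : Int) : Int :=
  PySem.Int.mod (calcPrefixHashGoA a mod 0 s.toList) mod

-- ===== PORT B =====
-- Python's builtin pow(a, e, m) (e ≥ 0, m ≠ 0): exact — it returns (a^e) floor-mod m,
-- including pow(a, 0, m) = 1 % m; ported as a simple recursion computing the same value.
def pyModPow (a : Int) (e : Nat) (m : Int) : Int :=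
  match e with
  | 0 => PySem.Int.mod 1 m
  | e + 1 => PySem.Int.mod (a * pyModPow a e m) m

-- `total += ord(s[i]) * pow(a, l-1-i, mod)`: at position i the exponent l-1-i is the
-- length of the remaining suffix, so the sum recurses on the suffix.
def calcPrefixHashSumB (a m : Int) : List Char → Int
  | [] => 0
  | c :: rest => (c.toNat : Int) * pyModPow a rest.length m + calcPrefixHashSumB a m rest

def calc_prefix_hash_alt (s : String) (a : Int) (mod : Int) : Int :=
  PySem.Int.mod (calcPrefixHashSumB a mod s.toList) mod

-- ===== PRECONDITION & SPEC =====
-- Python's `%` (and 3-arg pow) raises on mod == 0 (for every s, even empty).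
def Pre_calc_prefix_hash (s : String) (a : Int) (mod : Int) : Prop := mod ≠ 0
instance (s : String) (a : Int) (mod : Int) : Decidable (Pre_calc_prefix_hash s a mod) := by
  unfold Pre_calc_prefix_hash; infer_instance

def pvWitness_calc_prefix_hash : String × Int × Int := ("ab", 3, 7)

def Spec_calc_prefix_hash (s : String) (a : Int) (mod : Int) (out : Int) : Prop := out = calc_prefix_hash_alt s a mod
instance (s : String) (a : Int) (mod : Int) (out : Int) : Decidable (Spec_calc_prefix_hash s a mod out) := by unfold Spec_calc_prefix_hash; infer_instance

-- ===== CLAIM =====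
def Claim_equal_calc_prefix_hash : Prop := ∀ (s : String) (a : Int) (mod : Int), Dom_calc_prefix_hash s a mod → Pre_calc_prefix_hash s a mod → Spec_calc_prefix_hash s a mod (calc_prefix_hash s a mod)

-- ===== LEMMAS AND PROOFS =====

-- the exact polynomial value Σ ord(xs[j])·a^j (low-order-first list)
def pvVal (a : Int) : List Char → Int
  | [] => 0
  | c :: t => (c.toNat : Int) + a * pvVal a t

-- mod-free shadow of loop A
def pvPureA (a : Int) : Int → List Char → Int
  | r, [] => r
  | r, c :: rest =>
    pvPureA a (if rest ≠ [] then (r + (c.toNat : Int)) * a else r + (c.toNat : Int)) rest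

lemma pymod_sub_dvd (x m : Int) : m ∣ x - PySem.Int.mod x m := by
  refine ⟨PySem.Int.floordiv x m, ?_⟩
  have h := PySem.Int.floordiv_mul_add_mod x m
  linarith [h]

-- Python % absorbs congruent arguments: m ∣ x - y lets the reduced x stand for y
lemma dvd_pymod_sub {x y m : Int} (h : m ∣ x - y) : m ∣ PySem.Int.mod x m - y := by
  obtain ⟨k, hk⟩ := h
  obtain ⟨j, hj⟩ := pymod_sub_dvd x m
  exact ⟨k - j, by rw [mul_sub]; linarith⟩

-- Python % is determined by the residue class (m ≠ 0)
lemma pymod_congr {x y m : Int} (hm : m ≠ 0) (h : m ∣ x - y) :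
    PySem.Int.mod x m = PySem.Int.mod y m := by
  have hd : m ∣ PySem.Int.mod x m - PySem.Int.mod y m := by
    have h1 := dvd_pymod_sub h
    have h2 := pymod_sub_dvd y m
    have := dvd_add h1 h2
    rwa [sub_add_sub_cancel] at this
  rcases lt_or_gt_of_ne hm with hneg | hpos
  · have b1 := PySem.Int.mod_neg_bounds (a := x) hneg
    have b2 := PySem.Int.mod_neg_bounds (a := y) hneg
    have habs : |PySem.Int.mod x m - PySem.Int.mod y m| < -m := by
      rw [abs_lt]; constructor <;> linarith [b1.1, b1.2, b2.1, b2.2]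
    have := Int.eq_zero_of_abs_lt_dvd hd.neg_left habs
    linarith [this]
  · have b1n := PySem.Int.mod_nonneg (a := x) hpos
    have b1l := PySem.Int.mod_lt (a := x) hpos
    have b2n := PySem.Int.mod_nonneg (a := y) hpos
    have b2l := PySem.Int.mod_lt (a := y) hpos
    have habs : |PySem.Int.mod x m - PySem.Int.mod y m| < m := by
      rw [abs_lt]; constructor <;> linarith
    have := Int.eq_zero_of_abs_lt_dvd hd habs
    linarith [this]

-- modular exponentiation tracks the true power modulo m
lemma pyModPow_congr (a m : Int) : ∀ e : Nat, m ∣ pyModPow a e m - a ^ e := by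
  intro e
  induction e with
  | zero => simpa [pyModPow] using dvd_pymod_sub (x := (1 : Int)) (y := 1) (m := m) (by simp)
  | succ e ih =>
    simp only [pyModPow]
    apply dvd_pymod_sub
    obtain ⟨k, hk⟩ := ih
    exact ⟨a * k, by rw [pow_succ]; linear_combination a * hk⟩

-- loop A tracks its mod-free shadow modulo m
lemma goA_congr (a m : Int) (cs : List Char) :
    ∀ r r' : Int, m ∣ r - r' → m ∣ calcPrefixHashGoA a m r cs - pvPureA a r' cs := by
  induction cs with
  | nil => intro r r' h; simpa [calcPrefixHashGoA, pvPureA] using h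
  | cons c rest ih =>
    intro r r' h
    by_cases hr : rest = []
    · subst hr
      simp only [calcPrefixHashGoA, pvPureA, ne_eq, not_true_eq_false, if_false]
      apply dvd_pymod_sub
      have e : (r + (c.toNat : Int)) - (r' + (c.toNat : Int)) = r - r' := by ring
      rw [e]; exact h
    · simp only [calcPrefixHashGoA, pvPureA, ne_eq, hr, not_false_eq_true, if_true]
      apply ih
      apply dvd_pymod_sub
      have e : (r + (c.toNat : Int)) * a - (r' + (c.toNat : Int)) * a = (r - r') * a := by ring
      rw [e]; exact h.mul_right a

lemma pvVal_append_singleton (a : Int) (xs : List Char) (c : Char) :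
    pvVal a (xs ++ [c]) = pvVal a xs + (c.toNat : Int) * a ^ xs.length := by
  induction xs with
  | nil => simp [pvVal]
  | cons d t ih => simp [pvVal, ih, pow_succ]; ring

-- B's term-by-term sum tracks the polynomial over the reversed list modulo m
lemma sumB_congr (a m : Int) (cs : List Char) :
    m ∣ calcPrefixHashSumB a m cs - pvVal a cs.reverse := by
  induction cs with
  | nil => simp [calcPrefixHashSumB, pvVal]
  | cons c rest ih =>
    rw [show (c :: rest).reverse = rest.reverse ++ [c] from List.reverse_cons,
        pvVal_append_singleton]
    simp only [calcPrefixHashSumB, List.length_reverse]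
    have hp := pyModPow_congr a m rest.length
    have e : (c.toNat : Int) * pyModPow a rest.length m + calcPrefixHashSumB a m rest
        - (pvVal a rest.reverse + (c.toNat : Int) * a ^ rest.length)
        = (c.toNat : Int) * (pyModPow a rest.length m - a ^ rest.length)
          + (calcPrefixHashSumB a m rest - pvVal a rest.reverse) := by ring
    rw [e]
    exact dvd_add (hp.mul_left _) ih

-- Horner loop A computes the polynomial Σ ord(s[i])·a^(l-1-i) = pvVal over the reversed list
lemma pureA_eq (a : Int) : ∀ (rest : List Char) (c : Char) (r : Int),
    pvPureA a r (c :: rest) = r * a ^ rest.length + pvVal a ((c :: rest).reverse) := by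
  intro rest
  induction rest with
  | nil => intro c r; simp [pvPureA, pvVal]
  | cons d t ih =>
    intro c r
    have step : pvPureA a r (c :: d :: t) = pvPureA a ((r + (c.toNat : Int)) * a) (d :: t) := by
      conv_lhs => rw [pvPureA]
      rw [if_pos (List.cons_ne_nil d t)]
    rw [step, ih d ((r + (c.toNat : Int)) * a)]
    rw [show (c :: d :: t).reverse = (d :: t).reverse ++ [c] from List.reverse_cons, pvVal_append_singleton]
    simp only [List.length_cons, List.length_reverse, pow_succ]
    ring

-- ===== VERDICT =====
theorem calc_prefix_hash_spec : Claim_equal_calc_prefix_hash := by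
  intro s a m _ hpre
  have hm : m ≠ 0 := hpre
  unfold Spec_calc_prefix_hash calc_prefix_hash calc_prefix_hash_alt
  cases hcs : s.toList with
  | nil => simp [calcPrefixHashGoA, calcPrefixHashSumB]
  | cons c rest =>
    apply pymod_congr hm
    have hA : m ∣ calcPrefixHashGoA a m 0 (c :: rest) - pvPureA a 0 (c :: rest) :=
      goA_congr a m (c :: rest) 0 0 (by simp)
    have eA : pvPureA a 0 (c :: rest) = pvVal a ((c :: rest).reverse) := by
      rw [pureA_eq]; ring
    rw [eA] at hA
    have hB := sumB_congr a m (c :: rest)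
    have e : calcPrefixHashGoA a m 0 (c :: rest) - calcPrefixHashSumB a m (c :: rest)
        = (calcPrefixHashGoA a m 0 (c :: rest) - pvVal a ((c :: rest).reverse))
          - (calcPrefixHashSumB a m (c :: rest) - pvVal a ((c :: rest).reverse)) := by
      ring
    rw [e]; exact dvd_sub hA hB
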